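-- pv_equiv track=rewrite | github.com/mateusgrellert/hm-ccontrol | PSetGeneration/PSetBuilder.py | getNextCfg
-- ===== SOURCE A (Python) =====
-- def getNextCfg(currCmd, costList):
-- 	sortedBD = sorted(costList.items(), key=lambda x: x[1][2]) # sort by [1][0] -- BD-BR INC, [1][1] -- TIME SAVINGS, [1][2] -- RDCCost
-- 	currCfgStr = getCfgString(currCmd)
-- 	if not currCfgStr:
-- 		currCfgStr = sortedBD[1][0]
--
-- 	for cfg, time_bdinc_rdccost in sortedBD:
-- 		[bdInc, timeSavings, rdccost] = time_bdinc_rdccost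
-- 		jointCfg = joinConfigs(currCfgStr, cfg)
-- 		if jointCfg not in costList.keys():
-- 			return getCmdString(jointCfg)
--
--
-- 	return False
--
-- def removeParamIfExists(currCfg, param):
-- 	if param:
-- 		[p,val] = param.split('=')
-- 		currParams = currCfg.split('_')
-- 		for currP_Val in currParams:
-- 			currP = currP_Val.split('=')[0]
-- 			if p == currP:
-- 				currParams.remove(currP_Val)
-- 		return '_'.join(currParams)
-- 	else: return currCfg
--
-- def joinConfigs(cfg, params):
-- 	for param in params.split('_'):
-- 		cfg = removeParamIfExists(cfg, param)
-- 	currParams = sorted(cfg.split('_') + params.split('_'))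
-- 	return ('_'.join([x for x in currParams if x]))
--
-- def getCfgString(commandLine):
-- 	return '_'.join([x.strip('--') for x in sorted(commandLine.split())])
--
-- def getCmdString(cfg):
-- 	return ' --'+(' --'.join(cfg.split('_')))
-- ===== SOURCE B (Python) =====
-- def getNextCfg(currCmd, costList):
-- 	currCfgStr = getCfgString(currCmd)
-- 	items = list(costList.items())
-- 	if not currCfgStr:
-- 		_, rest = extractMin(items)
-- 		currCfgStr = extractMin(rest)[0][0]
-- 	while items:
-- 		(cfg, vals), rest = extractMin(items)
-- 		[bdInc, timeSavings, rdccost] = vals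
-- 		jointCfg = joinConfigs(currCfgStr, cfg)
-- 		if jointCfg not in costList:
-- 			return getCmdString(jointCfg)
-- 		items = rest
-- 	return False
--
-- def extractMin(items):
-- 	i = min(range(len(items)), key=lambda k: items[k][1][2])
-- 	return items[i], items[:i] + items[i+1:]
--
-- def removeParamIfExists(currCfg, param):
-- 	if param:
-- 		[p,val] = param.split('=')
-- 		currParams = currCfg.split('_')
-- 		for currP_Val in currParams:
-- 			currP = currP_Val.split('=')[0]
-- 			if p == currP:
-- 				currParams.remove(currP_Val)
-- 		return '_'.join(currParams)
-- 	else: return currCfg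
--
-- def joinConfigs(cfg, params):
-- 	for param in params.split('_'):
-- 		cfg = removeParamIfExists(cfg, param)
-- 	currParams = sorted(cfg.split('_') + params.split('_'))
-- 	return ('_'.join([x for x in currParams if x]))
--
-- def getCfgString(commandLine):
-- 	return '_'.join([x.strip('--') for x in sorted(commandLine.split())])
--
-- def getCmdString(cfg):
-- 	return ' --'+(' --'.join(cfg.split('_')))
-- ===== Notes on version B (the rewrite author's own statement) =====
-- stated objective: alternative
-- what changed: A sorts the whole dict by RD-cost and scans the sorted list for the first config whose joint config is not yet in the dict; B never sorts: it repeatedly extracts the cheapest remaining entry (first index of the minimum, matching the stable sort's tie order) and stops at the first valid one, so only the scanned prefix is ever ordered, and the empty-currCfgStr branch picks the second-cheapest key by two min-extractions instead of sorting; B keeps A's 'return False' when no candidate is valid, so the two Pythons agree there too.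
-- outside the precondition, e.g. on getNextCfg('ab', {}): A returns False, B returns False; on getNextCfg('--a=1', {'a=1': [0, 0, 0]}): A returns False, B returns False
import Mathlib
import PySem

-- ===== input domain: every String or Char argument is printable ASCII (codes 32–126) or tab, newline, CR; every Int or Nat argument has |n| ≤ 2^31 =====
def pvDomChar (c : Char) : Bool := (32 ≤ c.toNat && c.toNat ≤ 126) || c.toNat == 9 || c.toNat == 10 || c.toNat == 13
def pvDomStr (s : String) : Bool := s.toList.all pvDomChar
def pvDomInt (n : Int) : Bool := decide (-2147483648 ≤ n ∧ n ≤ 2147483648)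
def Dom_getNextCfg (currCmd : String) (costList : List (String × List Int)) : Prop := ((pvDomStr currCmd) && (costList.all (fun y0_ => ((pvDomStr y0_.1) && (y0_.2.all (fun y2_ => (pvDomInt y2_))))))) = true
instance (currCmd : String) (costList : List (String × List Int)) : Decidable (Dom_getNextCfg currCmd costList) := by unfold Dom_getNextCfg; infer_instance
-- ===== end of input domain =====

-- B replaces A's sort-the-whole-dict-then-scan by a sort-free selection scan: repeatedly extract the
-- cheapest remaining entry (first wins on ties, = the stable sort's order) and stop at the first whose
-- joint config is new (objective: alternative decomposition, same result).
-- On inputs with no valid candidate BOTH Pythons return the identical bool False (B keeps A's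
-- 'return False' branch); that bool is not a value of Optional[str], so those inputs sit outside
-- Pre_ purely for the type convention — the two Pythons do not differ there.

-- ===== PORT A =====
-- shared module helpers (used verbatim by both Python versions); sorted(strings) compares
-- via .toList — Python's code-point lexicographic order (PYSEM: Python's str '<' IS '<' on s.toList)

-- s.split(sep) for the literal nonempty separators used in this module (split? is some for sep ≠ "")
def splitSep (s sep : String) : List String := (PySem.Str.split? s sep).getD []

-- the sort/selection key lambda x: x[1][2] (total stand-in: Pre_ keeps every value list at length ≥ 3)
def kf (x : String × List Int) : Int := PySem.List.pyGetD x.2 2 0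

-- the Python 'for currP_Val in currParams: … currParams.remove(currP_Val)' loop
-- (index-based iteration over a list mutated by remove, exactly as CPython runs it;
-- structural on a fuel ≥ the number of iterations: i grows by 1 each step and the list never
-- grows, so the loop runs at most (initial length) steps — the fuel-0 arm is unreachable)
def rmLoop (p : String) (lst : List String) (i fuel : Nat) : List String :=
  match fuel with
  | 0 => lst
  | fuel + 1 =>
    if h : i < lst.length then
      let x := lst[i]
      if p = (splitSep x "=").headD "" then
        rmLoop p ((PySem.List.remove? lst x).getD lst) (i + 1) fuel
      else
        rmLoop p lst (i + 1) fuel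
    else lst

def removeParamIfExists (currCfg param : String) : Option String :=
  if param ≠ "" then
    match splitSep param "=" with
    | [p, _] => some (PySem.Str.join "_" (rmLoop p (splitSep currCfg "_") 0 ((splitSep currCfg "_").length)))
    | _ => none          -- '[p,val] = param.split('=')' raises ValueError
  else some currCfg

-- the 'for param in params.split('_'): cfg = removeParamIfExists(cfg, param)' loop
def joinLoop (cfg : String) (ps : List String) : Option String :=
  match ps with
  | [] => some cfg
  | p :: rest =>
    match removeParamIfExists cfg p with
    | none => none
    | some c => joinLoop c rest

def joinConfigs (cfg params : String) : Option String :=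
  match joinLoop cfg (splitSep params "_") with
  | none => none
  | some c =>
    let currParams := PySem.List.sorted (splitSep c "_" ++ splitSep params "_") (fun x => x.toList) false
    some (PySem.Str.join "_" (currParams.filter (fun x => x ≠ "")))

def getCfgString (commandLine : String) : String :=
  PySem.Str.join "_"
    ((PySem.List.sorted (PySem.Str.split₀ commandLine) (fun x => x.toList) false).map
      (fun x => PySem.Str.stripChars x "--"))

def getCmdString (cfg : String) : String :=
  PySem.Str.join "" [" --", PySem.Str.join " --" (splitSep cfg "_")]

-- A's for-loop over the sorted items (the final 'return False' is none, and so is any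
-- in-loop exception, which Pre_ excludes)
def goA (c : String) (keys : List String) (l : List (String × List Int)) : Option String :=
  match l with
  | [] => none          -- the loop ends: Python returns False
  | (cfg, vals) :: rest =>
    match vals with
    | [_, _, _] =>
      match joinConfigs c cfg with
      | none => none
      | some j => if keys.contains j then goA c keys rest else some (getCmdString j)
    | _ => none          -- '[bdInc, timeSavings, rdccost] = vals' raises ValueError

def getNextCfg (currCmd : String) (costList : List (String × List Int)) : Option String :=
  let sortedBD := PySem.List.sorted costList kf false
  let c0 := getCfgString currCmd
  let c? : Option String :=
    if c0 = "" then (PySem.List.pyGet? sortedBD 1).map Prod.fst else some c0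
  match c? with
  | none => none          -- sortedBD[1] raises IndexError (outside Pre_)
  | some c => goA c (costList.map Prod.fst) sortedBD

-- ===== PORT B =====
-- extractMin(items) = (items[i], items[:i] + items[i+1:]) for i the FIRST index of minimal
-- vals[2] (Python's min over range(len(items)) with key items[k][1][2]); none = min of an
-- empty sequence (ValueError)
def selMin (l : List (String × List Int)) :
    Option ((String × List Int) × List (String × List Int)) :=
  match l with
  | [] => none
  | x :: t =>
    match selMin t with
    | none => some (x, [])
    | some (m, r) => if kf m < kf x then some (m, x :: r) else some (x, t)

-- B's while-loop: extract the cheapest remaining entry, stop at the first valid joint config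
-- (fuel = number of remaining items; each extraction removes one, so fuel never runs out)
def goB (c : String) (keys : List String) (items : List (String × List Int)) (fuel : Nat) :
    Option String :=
  match fuel with
  | 0 => none          -- unreachable: the top call passes fuel = items.length
  | fuel + 1 =>
    match selMin items with
    | none => none      -- 'while items:' ends: Python returns False
    | some ((cfg, vals), rest) =>
      match vals with
      | [_, _, _] =>
        match joinConfigs c cfg with
        | none => none
        | some j => if keys.contains j then goB c keys rest fuel else some (getCmdString j)
      | _ => none

def getNextCfg_alt (currCmd : String) (costList : List (String × List Int)) : Option String :=
  let c0 := getCfgString currCmd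
  let c? : Option String :=
    if c0 = "" then
      match selMin costList with
      | none => none
      | some (_, rest) =>
        match selMin rest with
        | none => none
        | some (m2, _) => some m2.1
    else some c0
  match c? with
  | none => none
  | some c => goB c (costList.map Prod.fst) costList costList.length

-- ===== PRECONDITION & SPEC =====
-- every '_'-segment of a dict key is empty or has exactly one '=' (otherwise the unpack in
-- removeParamIfExists raises ValueError as soon as the key is processed)
def wfKey (k : String) : Bool :=
  (splitSep k "_").all (fun seg => seg == "" || (splitSep seg "=").length == 2)

-- the config string A works with: getCfgString(currCmd), or the second-cheapest key when it is empty
def currCfg? (currCmd : String) (costList : List (String × List Int)) : Option String :=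
  if getCfgString currCmd = "" then
    (PySem.List.pyGet? (PySem.List.sorted costList kf false) 1).map Prod.fst
  else some (getCfgString currCmd)

-- an entry A can process without raising: exactly 3 values and a well-formed key
def cleanB (x : String × List Int) : Bool := x.2.length == 3 && wfKey x.1

-- an entry whose joint config is not yet a key of the dict (A returns there)
def validB (currCmd : String) (costList : List (String × List Int)) (x : String × List Int) : Bool :=
  !((costList.map Prod.fst).contains
      ((joinConfigs ((currCfg? currCmd costList).getD "") x.1).getD ""))

-- Pre_ = exactly the inputs on which Python A returns a str: all value lists reach index 2 (the
-- sort key), ≥ 2 entries when getCfgString(currCmd) is empty (else sortedBD[1] raises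
-- IndexError), and some clean valid entry is preceded (in the stable sort order: smaller cost,
-- or equal cost and not later in the dict) only by clean entries — so A's scan returns before
-- touching a malformed entry.  Excluded although A returns: the no-valid-candidate inputs, where
-- A and B both return the SAME bool False — a value outside Optional[str] that the typed ports
-- cannot carry; the exclusion reflects only the type convention, not any behavioural difference
-- (see cites).
def Pre_getNextCfg (currCmd : String) (costList : List (String × List Int)) : Prop :=
  costList.all (fun x => decide (3 ≤ x.2.length)) = true ∧
  (((PySem.Str.split₀ currCmd).map (fun t => PySem.Str.stripChars t "--") = [] ∨
    (PySem.Str.split₀ currCmd).map (fun t => PySem.Str.stripChars t "--") = [""]) →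
      2 ≤ costList.length) ∧
  (List.range costList.length).any (fun i =>
     let x := costList.getD i ("", [])
     cleanB x && validB currCmd costList x &&
     (List.range costList.length).all (fun j =>
       let y := costList.getD j ("", [])
       !(decide (kf y < kf x) || (decide (kf y = kf x) && decide (j ≤ i))) || cleanB y)) = true

instance (currCmd : String) (costList : List (String × List Int)) : Decidable (Pre_getNextCfg currCmd costList) := by unfold Pre_getNextCfg; infer_instance

def pvWitness_getNextCfg : String × (List (String × List Int)) :=
  ("--x=1", [("a=2", [0, 1, 2]), ("b=3", [1, 0, 1])])

def Spec_getNextCfg (currCmd : String) (costList : List (String × List Int)) (out : Option String) : Prop := out = getNextCfg_alt currCmd costList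
instance (currCmd : String) (costList : List (String × List Int)) (out : Option String) : Decidable (Spec_getNextCfg currCmd costList out) := by unfold Spec_getNextCfg; infer_instance

-- ===== CLAIM (what is proved, stated in full; the proofs are below) =====
def Claim_equal_getNextCfg : Prop := ∀ (currCmd : String) (costList : List (String × List Int)), Dom_getNextCfg currCmd costList → Pre_getNextCfg currCmd costList → Spec_getNextCfg currCmd costList (getNextCfg currCmd costList)

-- ===== LEMMAS AND PROOFS =====

lemma selMin_none_iff (l : List (String × List Int)) : selMin l = none ↔ l = [] := by
  cases l with
  | nil => simp [selMin]
  | cons x t =>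
    simp only [selMin]
    cases selMin t with
    | none => simp
    | some p => by_cases h : kf p.1 < kf x <;> simp [h]

lemma selMin_length (l : List (String × List Int)) (m : String × List Int)
    (r : List (String × List Int)) (h : selMin l = some (m, r)) : r.length + 1 = l.length := by
  induction l generalizing m r with
  | nil => simp [selMin] at h
  | cons x t ih =>
    simp only [selMin] at h
    cases ht : selMin t with
    | none =>
      rw [ht] at h
      have : t = [] := (selMin_none_iff t).mp ht
      simp at h
      simp [← h.2, this]
    | some p =>
      obtain ⟨m', r'⟩ := p
      simp only [ht] at h
      by_cases hlt : kf m' < kf x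
      · simp only [if_pos hlt] at h
        have := ih m' r' ht
        simp at h
        simp [← h.2, ← this]
      · simp only [if_neg hlt] at h
        simp at h
        simp [← h.2]

lemma selMin_append (l : List (String × List Int)) (x : String × List Int) :
    selMin (l ++ [x]) =
      (match selMin l with
       | none => some (x, [])
       | some (m, r) => if kf x < kf m then some (x, l) else some (m, r ++ [x])) := by
  induction l with
  | nil => simp [selMin]
  | cons y t ih =>
    show selMin (y :: (t ++ [x])) = _
    simp only [selMin, ih]
    cases ht : selMin t with
    | none =>
      have : t = [] := (selMin_none_iff t).mp ht
      subst this
      by_cases h1 : kf x < kf y <;> simp [h1]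
    | some p =>
      obtain ⟨m, r⟩ := p
      by_cases h1 : kf x < kf m
      · by_cases h2 : kf m < kf y
        · have h3 : kf x < kf y := lt_trans h1 h2
          simp [h1, h2, h3]
        · by_cases h3 : kf x < kf y <;> simp [h1, h2, h3]
      · by_cases h2 : kf m < kf y
        · simp [h1, h2]
        · have h3 : ¬ kf x < kf y := by omega
          simp [h1, h2, h3]

lemma sorted_insertBy_append (l : List (String × List Int)) (x : String × List Int) :
    PySem.List.sorted (l ++ [x]) kf false =
      PySem.List.insertBy (fun a b => decide (kf a < kf b)) x (PySem.List.sorted l kf false) := by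
  rw [PySem.List.sorted_eq_foldl_insertBy, PySem.List.sorted_eq_foldl_insertBy, List.foldl_append]
  rfl

lemma sorted_selMin (l : List (String × List Int)) :
    PySem.List.sorted l kf false =
      (match selMin l with
       | none => []
       | some (m, r) => m :: PySem.List.sorted r kf false) := by
  induction l using List.reverseRecOn with
  | nil => simp [selMin, PySem.List.sorted_eq_foldl_insertBy]
  | append_singleton l x ih =>
    rw [sorted_insertBy_append, ih, selMin_append]
    cases hsl : selMin l with
    | none =>
      have : l = [] := (selMin_none_iff l).mp hsl
      subst this
      simp [PySem.List.insertBy, PySem.List.sorted_eq_foldl_insertBy]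
    | some p =>
      obtain ⟨m, r⟩ := p
      rw [PySem.List.insertBy.eq_2]
      have hl : PySem.List.sorted l kf false = m :: PySem.List.sorted r kf false := by
        rw [ih, hsl]
      by_cases h1 : kf x < kf m
      · simp [h1, ← hl]
      · simp only [h1, decide_false, Bool.false_eq_true, if_neg, not_false_iff]
        rw [← sorted_insertBy_append]

lemma goAB (c : String) (keys : List String) :
    ∀ (n : Nat) (items : List (String × List Int)), items.length ≤ n →
      goA c keys (PySem.List.sorted items kf false) = goB c keys items n := by
  intro n
  induction n with
  | zero =>
    intro items hlen
    have : items = [] := List.eq_nil_of_length_eq_zero (Nat.le_zero.mp hlen)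
    subst this
    simp [goA, goB, PySem.List.sorted_eq_foldl_insertBy]
  | succ n ih =>
    intro items hlen
    cases hsl : selMin items with
    | none =>
      have : items = [] := (selMin_none_iff items).mp hsl
      subst this
      simp [goA, goB, hsl, PySem.List.sorted_eq_foldl_insertBy]
    | some p =>
      obtain ⟨⟨cfg, vals⟩, rest⟩ := p
      have hsorted : PySem.List.sorted items kf false =
          (cfg, vals) :: PySem.List.sorted rest kf false := by
        rw [sorted_selMin, hsl]
      have hrest : rest.length ≤ n := by
        have := selMin_length items (cfg, vals) rest hsl
        omega
      rw [hsorted]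
      cases vals with
      | nil => simp [goA, goB, hsl]
      | cons a t1 => cases t1 with
        | nil => simp [goA, goB, hsl]
        | cons b t2 => cases t2 with
          | nil => simp [goA, goB, hsl]
          | cons d t3 => cases t3 with
            | cons e t4 => simp [goA, goB, hsl]
            | nil =>
              cases hj : joinConfigs c cfg with
              | none => simp [goA, goB, hsl, hj]
              | some j =>
                by_cases hc : keys.contains j = true
                · simp only [goA, goB, hsl, hj, hc, if_pos]
                  exact ih rest hrest
                · have hm : j ∉ keys := by simpa using hc
                  simp [goA, goB, hsl, hj, hm]

lemma second_eq (l : List (String × List Int)) :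
    (PySem.List.pyGet? (PySem.List.sorted l kf false) 1).map Prod.fst =
      (match selMin l with
       | none => none
       | some (_, rest) =>
         match selMin rest with
         | none => none
         | some (m2, _) => some m2.1) := by
  cases hsl : selMin l with
  | none =>
    have : l = [] := (selMin_none_iff l).mp hsl
    subst this
    simp [PySem.List.sorted_eq_foldl_insertBy, PySem.List.pyGet?, PySem.List.pyIdx?]
  | some p =>
    obtain ⟨m, r⟩ := p
    have h1 : PySem.List.sorted l kf false = m :: PySem.List.sorted r kf false := by
      rw [sorted_selMin, hsl]
    cases hsr : selMin r with
    | none =>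
      have : r = [] := (selMin_none_iff r).mp hsr
      subst this
      rw [h1]
      simp [hsr, PySem.List.sorted_eq_foldl_insertBy, PySem.List.pyGet?, PySem.List.pyIdx?]
    | some q =>
      obtain ⟨m2, r2⟩ := q
      have h2 : PySem.List.sorted r kf false = m2 :: PySem.List.sorted r2 kf false := by
        rw [sorted_selMin, hsr]
      rw [h1, h2]
      simp [hsr, PySem.List.pyGet?, PySem.List.pyIdx?]

-- ===== VERDICT (by name: the statement is the Claim_ definition above) =====
theorem getNextCfg_spec : Claim_equal_getNextCfg := by
  intro currCmd costList _hdom _hpre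
  unfold Spec_getNextCfg
  simp only [getNextCfg, getNextCfg_alt]
  rw [second_eq]
  cases hcc : (if getCfgString currCmd = "" then
      (match selMin costList with
       | none => none
       | some (_, rest) =>
         match selMin rest with
         | none => none
         | some (m2, _) => some m2.1)
    else some (getCfgString currCmd)) with
  | none => rfl
  | some c =>
    show goA c (costList.map Prod.fst) (PySem.List.sorted costList kf false) =
      goB c (costList.map Prod.fst) costList costList.length
    exact goAB c (costList.map Prod.fst) costList.length costList (Nat.le_refl _)
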